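-- pv_equiv track=rewrite | github.com/gufranSabri/Handwritten-Digits-Classification | feature_extractor.py | get_points_straight
-- ===== SOURCE A (Python) =====
-- def get_points_straight(img,line_coord, limit,dir):
--     first, last=None,None
--     for i in range(limit):
--         if dir == 1:
--             if img[line_coord][i] == 0:
--                 if first==None:first = [line_coord, i]
--                 else: last = [line_coord, i]
--         else:
--             if img[i][line_coord] == 0:
--                 if first==None:first= [i, line_coord]
--                 else: last = [i, line_coord]
--     return [first,last]
-- ===== SOURCE B (Python) =====
-- def get_points_straight(img, line_coord, limit, dir):
--     def pix(i):
--         return img[line_coord][i] if dir == 1 else img[i][line_coord]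
--
--     def point(i):
--         return [line_coord, i] if dir == 1 else [i, line_coord]
--
--     first = None
--     for i in range(limit):
--         if pix(i) == 0:
--             first = point(i)
--             break
--     last = None
--     if first is not None:
--         for i in range(limit - 1, -1, -1):
--             if pix(i) == 0:
--                 if point(i) != first:
--                     last = point(i)
--                 break
--     return [first, last]
-- ===== Notes on version B (the rewrite author's own statement) =====
-- stated objective: simpler
-- what changed: A's single stateful loop carrying (first,last) is replaced by a forward scan that breaks at the first zero and an independent backward scan over range(limit-1,-1,-1) that breaks at the last zero, which becomes `last` only when it differs from `first`.
import Mathlib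
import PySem

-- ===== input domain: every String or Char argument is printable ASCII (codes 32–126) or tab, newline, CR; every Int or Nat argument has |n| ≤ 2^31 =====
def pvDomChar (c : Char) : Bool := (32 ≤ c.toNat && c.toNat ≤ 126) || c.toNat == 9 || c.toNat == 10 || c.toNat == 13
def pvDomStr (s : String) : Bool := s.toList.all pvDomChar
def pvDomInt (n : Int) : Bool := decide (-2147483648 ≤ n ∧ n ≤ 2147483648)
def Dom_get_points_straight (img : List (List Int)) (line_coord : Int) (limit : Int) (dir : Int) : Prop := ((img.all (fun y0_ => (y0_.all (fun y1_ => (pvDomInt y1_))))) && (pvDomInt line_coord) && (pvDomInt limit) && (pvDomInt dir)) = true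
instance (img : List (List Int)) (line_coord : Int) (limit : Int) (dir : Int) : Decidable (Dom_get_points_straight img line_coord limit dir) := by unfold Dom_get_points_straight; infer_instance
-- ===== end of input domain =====

-- B replaces A's single stateful loop by a forward scan that breaks at the first zero
-- and an independent backward scan for the last zero (objective: simpler decomposition,
-- same cost); return value only, no mutation.

-- shared transliteration of the pixel access 'img[line_coord][i]' / 'img[i][line_coord]'
-- and of the point literal; both Pythons contain these exact expressions.
-- The .getD defaults are reached only outside Pre_ (where Python raises IndexError).
def pv_pix (img : List (List Int)) (line_coord : Int) (dir : Int) (i : Int) : Int :=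
  if dir = 1 then (PySem.List.pyGet? ((PySem.List.pyGet? img line_coord).getD []) i).getD 1
  else (PySem.List.pyGet? ((PySem.List.pyGet? img i).getD []) line_coord).getD 1

def pv_point (line_coord : Int) (dir : Int) (i : Int) : List Int :=
  if dir = 1 then [line_coord, i] else [i, line_coord]

-- ===== PORT A =====
-- one pass: first set once, every later zero overwrites last
def pv_stepA (img : List (List Int)) (line_coord : Int) (dir : Int)
    (st : Option (List Int) × Option (List Int)) (i : Int) :
    Option (List Int) × Option (List Int) :=
  if pv_pix img line_coord dir i = 0 then
    match st.1 with
    | none => (some (pv_point line_coord dir i), st.2)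
    | some _ => (st.1, some (pv_point line_coord dir i))
  else st

def get_points_straight (img : List (List Int)) (line_coord : Int) (limit : Int) (dir : Int) : List (Option (List Int)) :=
  let st := (PySem.List.pyRange 0 limit 1).foldl (pv_stepA img line_coord dir) (none, none)
  [st.1, st.2]

-- ===== PORT B =====
-- 'for i in …: if pix(i)==0: … break' = first zero index of the given index list
def pv_findZero (img : List (List Int)) (line_coord : Int) (dir : Int) : List Int → Option Int
  | [] => none
  | i :: rest =>
    if pv_pix img line_coord dir i = 0 then some i
    else pv_findZero img line_coord dir rest

def get_points_straight_alt (img : List (List Int)) (line_coord : Int) (limit : Int) (dir : Int) : List (Option (List Int)) :=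
  let first := (pv_findZero img line_coord dir (PySem.List.pyRange 0 limit 1)).map (pv_point line_coord dir)
  let last :=
    match first with
    | none => none
    | some fp =>
      match pv_findZero img line_coord dir (PySem.List.pyRange (limit - 1) (-1) (-1)) with
      | none => none
      | some l => if pv_point line_coord dir l ≠ fp then some (pv_point line_coord dir l) else none
  [first, last]

-- ===== PRECONDITION & SPEC =====
-- Pre_ excludes exactly the inputs where Python A raises IndexError: some access
-- img[line_coord][i] (dir==1) or img[i][line_coord] (dir!=1) with i < limit is out of range.
def Pre_get_points_straight (img : List (List Int)) (line_coord : Int) (limit : Int) (dir : Int) : Prop :=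
  limit ≤ 0 ∨
    (if dir = 1 then
      PySem.Raise.InRange img.length line_coord ∧
        limit ≤ ((PySem.List.pyGet? img line_coord).getD []).length
    else
      limit ≤ img.length ∧
        ∀ row ∈ img.take limit.toNat, PySem.Raise.InRange row.length line_coord)
instance (img : List (List Int)) (line_coord : Int) (limit : Int) (dir : Int) : Decidable (Pre_get_points_straight img line_coord limit dir) := by unfold Pre_get_points_straight; infer_instance

def pvWitness_get_points_straight : List (List Int) × Int × Int × Int := ([[0, 1], [0, 0]], 0, 2, 1)

def Spec_get_points_straight (img : List (List Int)) (line_coord : Int) (limit : Int) (dir : Int) (out : List (Option (List Int))) : Prop := out = get_points_straight_alt img line_coord limit dir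
instance (img : List (List Int)) (line_coord : Int) (limit : Int) (dir : Int) (out : List (Option (List Int))) : Decidable (Spec_get_points_straight img line_coord limit dir out) := by unfold Spec_get_points_straight; infer_instance

-- ===== CLAIM (what is proved, stated in full; the proofs are below) =====
def Claim_equal_get_points_straight : Prop := ∀ (img : List (List Int)) (line_coord : Int) (limit : Int) (dir : Int), Dom_get_points_straight img line_coord limit dir → Pre_get_points_straight img line_coord limit dir → Spec_get_points_straight img line_coord limit dir (get_points_straight img line_coord limit dir)

-- ===== LEMMAS AND PROOFS =====

theorem pv_point_inj {line_coord dir i j : Int}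
    (h : pv_point line_coord dir i = pv_point line_coord dir j) : i = j := by
  unfold pv_point at h; split_ifs at h <;> simpa using h

theorem pv_findZero_eq_find? (img : List (List Int)) (line_coord dir : Int) (L : List Int) :
    pv_findZero img line_coord dir L = L.find? (fun i => pv_pix img line_coord dir i == 0) := by
  induction L with
  | nil => rfl
  | cons i rest ih =>
    cases hb : (pv_pix img line_coord dir i == 0) with
    | true => simp [pv_findZero, beq_iff_eq.mp hb]
    | false =>
      have h : pv_pix img line_coord dir i ≠ 0 := by simpa using hb
      simp [pv_findZero, hb, h, ih]

-- folding A's step from a state whose 'first' is already set only updates 'last'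
theorem pv_foldA_some (img : List (List Int)) (line_coord dir : Int) (L : List Int)
    (q : List Int) (l : Option (List Int)) :
    L.foldl (pv_stepA img line_coord dir) (some q, l) =
      (some q,
        match L.reverse.find? (fun i => pv_pix img line_coord dir i == 0) with
        | some j => some (pv_point line_coord dir j)
        | none => l) := by
  induction L generalizing l with
  | nil => rfl
  | cons i rest ih =>
    simp only [List.foldl_cons, List.reverse_cons, List.find?_append]
    cases hb : (pv_pix img line_coord dir i == 0) with
    | true =>
      have h : pv_pix img line_coord dir i = 0 := beq_iff_eq.mp hb
      have hstep : pv_stepA img line_coord dir (some q, l) i = (some q, some (pv_point line_coord dir i)) := by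
        simp [pv_stepA, h]
      rw [hstep, ih]
      cases rest.reverse.find? (fun i => pv_pix img line_coord dir i == 0) <;> simp [hb, Option.or]
    | false =>
      have h : pv_pix img line_coord dir i ≠ 0 := by simpa using hb
      have hstep : pv_stepA img line_coord dir (some q, l) i = (some q, l) := by
        simp [pv_stepA, h]
      rw [hstep, ih]
      cases rest.reverse.find? (fun i => pv_pix img line_coord dir i == 0) <;> simp [hb, Option.or]

-- characterisation of A's whole fold in terms of first/last zero of the index list
theorem pv_foldA_none (img : List (List Int)) (line_coord dir : Int) (L : List Int)
    (hnd : L.Nodup) :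
    L.foldl (pv_stepA img line_coord dir) (none, none) =
      ((L.find? (fun i => pv_pix img line_coord dir i == 0)).map (pv_point line_coord dir),
        match L.find? (fun i => pv_pix img line_coord dir i == 0),
              L.reverse.find? (fun i => pv_pix img line_coord dir i == 0) with
        | some f, some g => if g = f then none else some (pv_point line_coord dir g)
        | _, _ => none) := by
  induction L with
  | nil => rfl
  | cons i rest ih =>
    have hi : i ∉ rest := (List.nodup_cons.mp hnd).1
    have hndr : rest.Nodup := (List.nodup_cons.mp hnd).2
    simp only [List.foldl_cons, List.find?_cons, List.reverse_cons, List.find?_append]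
    cases hb : (pv_pix img line_coord dir i == 0) with
    | true =>
      have h : pv_pix img line_coord dir i = 0 := beq_iff_eq.mp hb
      have hstep : pv_stepA img line_coord dir (none, none) i = (some (pv_point line_coord dir i), none) := by
        simp [pv_stepA, h]
      rw [hstep, pv_foldA_some]
      have hne : ∀ j, rest.reverse.find? (fun i => pv_pix img line_coord dir i == 0) = some j → j ≠ i := by
        intro j hj hji
        exact hi (by simpa [hji] using List.mem_reverse.mp (List.mem_of_find?_eq_some hj))
      cases hg : rest.reverse.find? (fun i => pv_pix img line_coord dir i == 0) with
      | none => simp [Option.or]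
      | some j => simp [Option.or, hne j hg]
    | false =>
      have h : pv_pix img line_coord dir i ≠ 0 := by simpa using hb
      have hstep : pv_stepA img line_coord dir (none, none) i = (none, none) := by
        simp [pv_stepA, h]
      rw [hstep, ih hndr]
      cases hf : rest.find? (fun i => pv_pix img line_coord dir i == 0) <;>
        cases hg : rest.reverse.find? (fun i => pv_pix img line_coord dir i == 0) <;>
        simp [Option.or]

-- ===== VERDICT (by name: the statement is the Claim_ definition above) =====
theorem get_points_straight_spec : Claim_equal_get_points_straight := by
  intro img line_coord limit dir _ _
  unfold Spec_get_points_straight get_points_straight get_points_straight_alt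
  have hrev : PySem.List.pyRange (limit - 1) (-1) (-1) = (PySem.List.pyRange 0 limit 1).reverse := by
    have := PySem.List.pyRange_neg_one_eq_reverse (limit - 1) (-1)
    simpa using this
  have hnd : (PySem.List.pyRange 0 limit 1).Nodup := PySem.List.nodup_pyRange_one 0 limit
  rw [pv_foldA_none img line_coord dir _ hnd]
  simp only [pv_findZero_eq_find?, hrev]
  cases hf : (PySem.List.pyRange 0 limit 1).find? (fun i => pv_pix img line_coord dir i == 0) with
  | none =>
    have : (PySem.List.pyRange 0 limit 1).reverse.find? (fun i => pv_pix img line_coord dir i == 0) = none := by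
      rw [List.find?_eq_none] at hf ⊢
      intro x hx; exact hf x (List.mem_reverse.mp hx)
    simp
  | some f =>
    cases hg : (PySem.List.pyRange 0 limit 1).reverse.find? (fun i => pv_pix img line_coord dir i == 0) with
    | none =>
      exfalso
      have := List.find?_eq_none.mp hg f (List.mem_reverse.mpr (List.mem_of_find?_eq_some hf))
      exact this (List.find?_some (p := fun i => pv_pix img line_coord dir i == 0) hf)
    | some g =>
      by_cases hgf : g = f
      · simp [hgf]
      · have : pv_point line_coord dir g ≠ pv_point line_coord dir f := fun h => hgf (pv_point_inj h)
        simp [hgf, this]
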